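-- pv_equiv track=rewrite | github.com/Robot-Will/Stino | stino/pyarduino/base/language_file.py | load_trans_pair
-- ===== SOURCE A (Python) =====
-- def load_trans_pair(block):
--     is_key = True
--     key = ''
--     value = ''
--     for line in block:
--         index = line.index('"')
--         cur_str = line[index + 1: -1]
--         if line.startswith('msgstr'):
--             is_key = False
--         if is_key:
--             key += cur_str
--         else:
--             value += cur_str
--     return (key, value)
-- ===== SOURCE B (Python) =====
-- def load_trans_pair(block):
--     lines = list(block)
--     idx = len(lines)
--     for i, line in enumerate(lines):
--         if line.startswith('msgstr'):
--             idx = i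
--             break
--     key = ''.join(line[line.index('"') + 1:-1] for line in lines[:idx])
--     value = ''.join(line[line.index('"') + 1:-1] for line in lines[idx:])
--     return (key, value)
-- ===== Notes on version B (the rewrite author's own statement) =====
-- stated objective: alternative
-- what changed: Replaces the stateful is_key flag loop with a partition: find the index of the first 'msgstr' line, then build key and value as two joins over the slice before and the slice from that index.
import Mathlib
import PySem

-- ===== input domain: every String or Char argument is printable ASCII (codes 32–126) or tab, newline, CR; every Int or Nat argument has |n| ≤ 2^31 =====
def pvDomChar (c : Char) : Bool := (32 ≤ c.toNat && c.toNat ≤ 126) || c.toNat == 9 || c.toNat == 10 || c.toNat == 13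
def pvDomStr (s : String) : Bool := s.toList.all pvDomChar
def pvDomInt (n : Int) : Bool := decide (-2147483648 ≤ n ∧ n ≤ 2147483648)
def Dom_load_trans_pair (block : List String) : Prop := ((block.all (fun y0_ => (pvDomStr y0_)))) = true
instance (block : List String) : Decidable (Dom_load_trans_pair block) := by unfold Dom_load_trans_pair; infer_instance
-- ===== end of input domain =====

-- B replaces A's stateful is_key flag loop by finding the first 'msgstr' line and
-- building key/value as two joins over the two slices (alternative decomposition, same cost).

-- ===== PORT A =====
-- A's per-line extraction: line[line.index('"') + 1 : -1]  (exact for lines containing '"',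
-- which Pre_ guarantees; on other lines Python raises ValueError)
def pvExtract (l : List Char) : List Char :=
  PySem.Chars.slice l (some (PySem.Chars.find l ['"'] + 1)) (some (-1))

def load_trans_pair (block : List String) : String × String :=
  let st := block.foldl
    (fun (s : Bool × List Char × List Char) line =>
      let l := line.toList
      let cur := pvExtract l
      let isKey := if PySem.Chars.startswith l "msgstr".toList then false else s.1
      if isKey then (isKey, s.2.1 ++ cur, s.2.2)
      else (isKey, s.2.1, s.2.2 ++ cur))
    (true, [], [])
  (String.ofList st.2.1, String.ofList st.2.2)

-- ===== PORT B =====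
-- index of the first line starting with 'msgstr' (length if none) — B's linear scan
def pvFirstMsgstr : List String → Nat
  | [] => 0
  | l :: ls => if PySem.Chars.startswith l.toList "msgstr".toList then 0 else pvFirstMsgstr ls + 1

def load_trans_pair_alt (block : List String) : String × String :=
  let idx := pvFirstMsgstr block
  let key := PySem.Chars.join [] ((block.take idx).map (fun l => pvExtract l.toList))
  let value := PySem.Chars.join [] ((block.drop idx).map (fun l => pvExtract l.toList))
  (String.ofList key, String.ofList value)

-- ===== PRECONDITION & SPEC =====
-- Pre_ excludes exactly the inputs where Python A raises ValueError: a line with no '"'.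
def Pre_load_trans_pair (block : List String) : Prop :=
  ∀ line ∈ block, PySem.Chars.isIn ['"'] line.toList = true
instance (block : List String) : Decidable (Pre_load_trans_pair block) := by
  unfold Pre_load_trans_pair; infer_instance

def pvWitness_load_trans_pair : List String := ["msgid \"hi\"", "msgstr \"salut\""]

def Spec_load_trans_pair (block : List String) (out : String × String) : Prop := out = load_trans_pair_alt block
instance (block : List String) (out : String × String) : Decidable (Spec_load_trans_pair block out) := by unfold Spec_load_trans_pair; infer_instance

-- ===== CLAIM (what is proved, stated in full; the proofs are below) =====
def Claim_equal_load_trans_pair : Prop := ∀ (block : List String), Dom_load_trans_pair block → Pre_load_trans_pair block → Spec_load_trans_pair block (load_trans_pair block)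

-- ===== LEMMAS AND PROOFS =====

-- ''.join is flatten
lemma pvJoin_nil_eq_flatten (ps : List (List Char)) :
    PySem.Chars.join ([] : List Char) ps = ps.flatten := by
  induction ps with
  | nil => rfl
  | cons p ps ih =>
    cases ps with
    | nil => simp [PySem.Chars.join, List.intercalate]
    | cons q qs =>
      simp only [PySem.Chars.join, List.intercalate] at ih ⊢
      simp [List.intersperse, ih]

-- abbreviation for A's loop body
def pvStep (s : Bool × List Char × List Char) (line : String) : Bool × List Char × List Char :=
  let l := line.toList
  let cur := pvExtract l
  let isKey := if PySem.Chars.startswith l "msgstr".toList then false else s.1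
  if isKey then (isKey, s.2.1 ++ cur, s.2.2)
  else (isKey, s.2.1, s.2.2 ++ cur)

lemma pvFoldl_eq_pvStep (block : List String) (s : Bool × List Char × List Char) :
    block.foldl
      (fun (s : Bool × List Char × List Char) line =>
        let l := line.toList
        let cur := pvExtract l
        let isKey := if PySem.Chars.startswith l "msgstr".toList then false else s.1
        if isKey then (isKey, s.2.1 ++ cur, s.2.2)
        else (isKey, s.2.1, s.2.2 ++ cur)) s = block.foldl pvStep s := rfl

lemma pvStep_eq_false (k v : List Char) (line : String) :
    pvStep (false, k, v) line = (false, k, v ++ pvExtract line.toList) := by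
  simp only [pvStep]
  split <;> simp_all

lemma pvStep_eq_true (k v : List Char) (line : String) :
    pvStep (true, k, v) line =
      if PySem.Chars.startswith line.toList "msgstr".toList
      then (false, k, v ++ pvExtract line.toList)
      else (true, k ++ pvExtract line.toList, v) := by
  simp only [pvStep]
  split <;> simp_all

-- once the flag is false, everything goes to value
lemma pvStep_false (block : List String) (k v : List Char) :
    block.foldl pvStep (false, k, v)
      = (false, k, v ++ (block.map (fun l => pvExtract l.toList)).flatten) := by
  induction block generalizing v with
  | nil => simp
  | cons hd tl ih =>
    rw [List.foldl_cons, pvStep_eq_false, ih]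
    simp

-- while the flag is true, the fold realises B's partition
lemma pvStep_true (block : List String) (k v : List Char) :
    block.foldl pvStep (true, k, v)
      = ((block.foldl pvStep (true, k, v)).1,
         k ++ ((block.take (pvFirstMsgstr block)).map (fun l => pvExtract l.toList)).flatten,
         v ++ ((block.drop (pvFirstMsgstr block)).map (fun l => pvExtract l.toList)).flatten) := by
  induction block generalizing k v with
  | nil => simp
  | cons hd tl ih =>
    by_cases h : PySem.Chars.startswith hd.toList "msgstr".toList = true
    · rw [List.foldl_cons, pvStep_eq_true, if_pos h, pvStep_false]
      have h2 : PySem.Chars.startswith hd.toList ['m','s','g','s','t','r'] = true := by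
        simpa using h
      simp [pvFirstMsgstr, h2]
    · have h' : PySem.Chars.startswith hd.toList "msgstr".toList = false := by simpa using h
      rw [List.foldl_cons, pvStep_eq_true, if_neg h, ih]
      have h2 : PySem.Chars.startswith hd.toList ['m','s','g','s','t','r'] = false := by
        simpa using h'
      simp [pvFirstMsgstr, h2]

-- ===== VERDICT (by name: the statement is the Claim_ definition above) =====
theorem load_trans_pair_spec : Claim_equal_load_trans_pair := by
  intro block _ _
  unfold Spec_load_trans_pair load_trans_pair load_trans_pair_alt
  rw [pvFoldl_eq_pvStep, pvStep_true block [] []]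
  simp [pvJoin_nil_eq_flatten]
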